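-- pv_equiv track=rewrite | github.com/WuKunhuan163/CLITools | paper_searcher/keyword_extractor.py | _merge_and_rank_keywords
-- ===== SOURCE A (Python) =====
-- from typing import List, Dict, Set
--
-- def _merge_and_rank_keywords(phrases: List[str],
--                             single_words: List[str],
--                             technical_terms: List[str]) -> List[str]:
--     """合并和排序关键词"""
--     keyword_scores = {}
--
--     # 短语权重最高
--     for phrase in phrases:
--         keyword_scores[phrase] = keyword_scores.get(phrase, 0) + 3
--
--     # 技术术语权重中等
--     for term in technical_terms:
--         keyword_scores[term] = keyword_scores.get(term, 0) + 2
--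
--     # 单词权重最低
--     for word in single_words:
--         keyword_scores[word] = keyword_scores.get(word, 0) + 1
--
--     # 按分数排序
--     sorted_keywords = sorted(keyword_scores.items(), key=lambda x: x[1], reverse=True)
--
--     return [keyword for keyword, score in sorted_keywords]
-- ===== SOURCE B (Python) =====
-- def _merge_and_rank_keywords(phrases, single_words, technical_terms):
--     """Merge keyword lists with weights 3/2/1 and rank by bucket (counting) sort."""
--     scores = {}
--     for group, weight in ((phrases, 3), (technical_terms, 2), (single_words, 1)):
--         for kw in group:
--             scores[kw] = scores.get(kw, 0) + weight
--     if not scores: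
--         return []
--     buckets = {}
--     for kw, s in scores.items():
--         buckets.setdefault(s, []).append(kw)
--     top = max(buckets)
--     return [kw for s in range(top, 0, -1) for kw in buckets.get(s, [])]
-- ===== Notes on version B (the rewrite author's own statement) =====
-- stated objective: alternative
-- what changed: Replaces the comparison sort of the score dict by a counting/bucket sort: keywords are grouped into buckets keyed by score and the buckets are emitted from the top score down to 1, preserving dict-insertion order within each bucket.
import Mathlib
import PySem

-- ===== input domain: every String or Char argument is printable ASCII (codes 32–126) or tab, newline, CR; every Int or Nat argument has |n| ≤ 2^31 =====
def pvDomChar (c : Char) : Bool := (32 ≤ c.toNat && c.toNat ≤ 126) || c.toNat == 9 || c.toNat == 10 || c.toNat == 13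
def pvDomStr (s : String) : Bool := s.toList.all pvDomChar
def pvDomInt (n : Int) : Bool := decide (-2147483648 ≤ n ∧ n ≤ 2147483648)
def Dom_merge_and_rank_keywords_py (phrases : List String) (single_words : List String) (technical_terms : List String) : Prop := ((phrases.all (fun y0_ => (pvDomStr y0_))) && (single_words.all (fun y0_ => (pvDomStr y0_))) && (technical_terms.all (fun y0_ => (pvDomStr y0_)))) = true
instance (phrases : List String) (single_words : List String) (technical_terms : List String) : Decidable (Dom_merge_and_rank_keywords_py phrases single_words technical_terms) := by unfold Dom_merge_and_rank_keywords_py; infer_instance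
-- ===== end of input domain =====

-- B replaces A's comparison sort of the score dict by a counting/bucket sort (buckets per
-- score, emitted from the top score down to 1); same return value, different algorithm.


-- ===== PORT A =====
def merge_and_rank_keywords_py (phrases : List String) (single_words : List String) (technical_terms : List String) : List String :=
  -- keyword_scores = {}; three accumulation loops with weights 3, 2, 1
  let d1 := phrases.foldl (fun d p => d.insert p (d.getD p 0 + 3)) (PySem.Dict.empty : PySem.Dict String Int)
  let d2 := technical_terms.foldl (fun d t => d.insert t (d.getD t 0 + 2)) d1
  let d3 := single_words.foldl (fun d w => d.insert w (d.getD w 0 + 1)) d2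
  -- sorted(keyword_scores.items(), key=lambda x: x[1], reverse=True); then project the keywords
  (PySem.List.sorted d3.items (fun x => x.2) true).map (fun x => x.1)

-- ===== PORT B =====
def merge_and_rank_keywords_py_alt (phrases : List String) (single_words : List String) (technical_terms : List String) : List String :=
  -- scores accumulated in one nested loop over ((phrases,3),(technical_terms,2),(single_words,1))
  let scores := [(phrases, (3 : Int)), (technical_terms, 2), (single_words, 1)].foldl
    (fun d gw => gw.1.foldl (fun d k => d.insert k (d.getD k 0 + gw.2)) d)
    (PySem.Dict.empty : PySem.Dict String Int)
  if scores.items = [] then []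
  else
    -- buckets.setdefault(s, []).append(kw)
    let buckets := scores.items.foldl
      (fun b p => b.modify p.2 [] (fun ks => ks ++ [p.1]))
      (PySem.Dict.empty : PySem.Dict Int (List String))
    -- top = max(buckets); concatenate buckets from top down to 1
    match PySem.List.max? buckets.keys (fun s => s) with
    | none => []   -- unreachable: buckets is nonempty when scores is
    | some top => (PySem.List.pyRange top 0 (-1)).flatMap (fun s => buckets.getD s [])

-- ===== PRECONDITION & SPEC =====
def Spec_merge_and_rank_keywords_py (phrases : List String) (single_words : List String) (technical_terms : List String) (out : List String) : Prop := out = merge_and_rank_keywords_py_alt phrases single_words technical_terms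
instance (phrases : List String) (single_words : List String) (technical_terms : List String) (out : List String) : Decidable (Spec_merge_and_rank_keywords_py phrases single_words technical_terms out) := by unfold Spec_merge_and_rank_keywords_py; infer_instance

-- ===== CLAIM (what is proved, stated in full; the proofs are below) =====
def Claim_equal_merge_and_rank_keywords_py : Prop := ∀ (phrases : List String) (single_words : List String) (technical_terms : List String), Dom_merge_and_rank_keywords_py phrases single_words technical_terms → Spec_merge_and_rank_keywords_py phrases single_words technical_terms (merge_and_rank_keywords_py phrases single_words technical_terms)

-- ===== LEMMAS AND PROOFS =====

-- [n, n-1, …, 1] as a structural recursion (proof-side image of range(top, 0, -1))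
def pvDsc : Nat → List Int
  | 0 => []
  | n + 1 => ((n : Int) + 1) :: pvDsc n

theorem pvDsc_eq_map (n : Nat) : pvDsc n = (List.range n).map (fun k : Nat => (n : Int) - (k : Int)) := by
  induction n with
  | zero => rfl
  | succ n ih =>
    rw [List.range_succ_eq_map]
    simp only [List.map_cons, List.map_map, pvDsc, ih]
    refine List.cons_eq_cons.mpr ⟨by push_cast; ring, List.map_congr_left fun k _ => ?_⟩
    simp

theorem pyRange_down (n : Nat) : PySem.List.pyRange (n : Int) 0 (-1) = pvDsc n := by
  rw [pvDsc_eq_map]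
  simp only [PySem.List.pyRange]
  norm_num
  rcases Nat.eq_zero_or_pos n with h | h
  · subst h; rfl
  · rw [if_pos h]
    exact List.map_congr_left fun k _ => by ring

theorem mem_pvDsc (n : Nat) (s : Int) : s ∈ pvDsc n ↔ 1 ≤ s ∧ s ≤ n := by
  induction n with
  | zero => simp [pvDsc]; omega
  | succ n ih => simp [pvDsc, ih]; omega

theorem insertBy_cons_true {α : Type} (p : α → α → Bool) (x y : α) (t : List α) (h : p x y = true) :
    PySem.List.insertBy p x (y :: t) = x :: y :: t := by
  simp [PySem.List.insertBy, h]

theorem insertBy_cons_false {α : Type} (p : α → α → Bool) (x y : α) (t : List α) (h : p x y = false) :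
    PySem.List.insertBy p x (y :: t) = y :: PySem.List.insertBy p x t := by
  simp [PySem.List.insertBy, h]

theorem insertBy_append_skip {α : Type} (p : α → α → Bool) (x : α) (as bs : List α)
    (h : ∀ a ∈ as, p x a = false) :
    PySem.List.insertBy p x (as ++ bs) = as ++ PySem.List.insertBy p x bs := by
  induction as with
  | nil => rfl
  | cons a as ih =>
    rw [List.cons_append, insertBy_cons_false p x a _ (h a (List.mem_cons_self ..)),
      ih (fun a ha => h a (List.mem_cons_of_mem _ ha))]
    simp

theorem insertBy_all_true {α : Type} (p : α → α → Bool) (x : α) (ys : List α)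
    (h : ∀ y ∈ ys, p x y = true) :
    PySem.List.insertBy p x ys = x :: ys := by
  cases ys with
  | nil => rfl
  | cons y t => exact insertBy_cons_true p x y t (h y (List.mem_cons_self ..))

-- inserting x into the bucket decomposition appends it to its own bucket
theorem insertBy_flatMap {α : Type} (key : α → Int) (l : List α) (x : α) (n : Nat)
    (hx1 : 1 ≤ key x) (hxn : key x ≤ n) :
    PySem.List.insertBy (fun a b => decide (key b < key a)) x
        ((pvDsc n).flatMap (fun s => l.filter (fun q => key q == s)))
      = (pvDsc n).flatMap (fun s => (l ++ [x]).filter (fun q => key q == s)) := by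
  induction n with
  | zero => omega
  | succ n ih =>
    simp only [pvDsc, List.flatMap_cons, List.filter_append]
    by_cases hc : key x = (n : Int) + 1
    · rw [insertBy_append_skip _ x _ _ (by
        intro a ha
        have := (List.mem_filter.mp ha).2
        simp at this
        simp [this, hc])]
      rw [insertBy_all_true _ x _ (by
        intro y hy
        obtain ⟨s, hs, hys⟩ := List.mem_flatMap.mp hy
        have hks := (List.mem_filter.mp hys).2
        have hsn := (mem_pvDsc n s).mp hs
        simp at hks
        simp [hks, hc]; omega)]
      have h1 : List.filter (fun q => key q == (n : Int) + 1) [x] = [x] := by simp [hc]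
      have h2 : (pvDsc n).flatMap (fun s => l.filter (fun q => key q == s) ++ (List.filter (fun q => key q == s) [x]))
          = (pvDsc n).flatMap (fun s => l.filter (fun q => key q == s)) := by
        apply List.flatMap_congr
        intro s hs
        have hsn := (mem_pvDsc n s).mp hs
        have : List.filter (fun q => key q == s) [x] = [] := by
          simp; omega
        simp [this]
      rw [h1, h2]
      simp
    · have hxle : key x ≤ (n : Int) := by omega
      rw [insertBy_append_skip _ x _ _ (by
        intro a ha
        have := (List.mem_filter.mp ha).2
        simp at this
        simp [this]; omega)]
      have h1 : List.filter (fun q => key q == (n : Int) + 1) [x] = [] := by simp; omega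
      rw [h1, List.append_nil, ih hxle]
      simp [List.filter_append]

-- A's stable descending sort IS the bucket decomposition
theorem sorted_rev_eq_flatMap {α : Type} (key : α → Int) (l : List α) (n : Nat)
    (hb : ∀ q ∈ l, 1 ≤ key q ∧ key q ≤ n) :
    PySem.List.sorted l key true = (pvDsc n).flatMap (fun s => l.filter (fun q => key q == s)) := by
  induction l using List.reverseRecOn with
  | nil => simp [PySem.List.sorted]
  | append_singleton l x ih =>
    have hl : ∀ q ∈ l, 1 ≤ key q ∧ key q ≤ n := fun q hq => hb q (List.mem_append_left _ hq)
    have hx := hb x (by simp)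
    rw [PySem.List.sorted_rev_eq_foldl_insertBy, List.foldl_append, List.foldl_cons, List.foldl_nil,
      ← PySem.List.sorted_rev_eq_foldl_insertBy, ih hl]
    exact insertBy_flatMap key l x n hx.1 hx.2

-- all values of the score dict stay ≥ 1 through a weight-c accumulation loop
theorem score_values_pos (l : List String) (c : Int) (hc : 1 ≤ c) (d : PySem.Dict String Int)
    (hd : ∀ q ∈ d.items, 1 ≤ q.2) :
    ∀ q ∈ (l.foldl (fun d k => d.insert k (d.getD k 0 + c)) d).items, 1 ≤ q.2 := by
  induction l generalizing d with
  | nil => exact hd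
  | cons k l ih =>
    simp only [List.foldl_cons]
    apply ih
    intro q hq
    rcases (PySem.Dict.mem_items_insert d k _ q).mp hq with h | h
    · subst h
      rw [PySem.Dict.getD_eq_get?_getD]
      cases hg : d.get? k with
      | none => simpa using hc
      | some v =>
        have := hd (k, v) (PySem.Dict.mem_items_of_get?_eq_some d hg)
        simp at this ⊢
        omega
    · exact hd q h.1

-- ===== VERDICT (by name: the statement is the Claim_ definition above) =====
theorem merge_and_rank_keywords_py_spec : Claim_equal_merge_and_rank_keywords_py := by
  intro phrases single_words technical_terms _
  unfold Spec_merge_and_rank_keywords_py merge_and_rank_keywords_py merge_and_rank_keywords_py_alt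
  simp only [List.foldl_cons, List.foldl_nil]
  set d3 := single_words.foldl (fun d w => d.insert w (d.getD w 0 + 1))
    (technical_terms.foldl (fun d t => d.insert t (d.getD t 0 + 2))
      (phrases.foldl (fun d p => d.insert p (d.getD p 0 + 3)) (PySem.Dict.empty : PySem.Dict String Int))) with hd3
  by_cases hnil : d3.items = []
  · simp [hnil, PySem.List.sorted]
  · simp only [if_neg hnil]
    -- all scores are ≥ 1
    have hpos : ∀ q ∈ d3.items, 1 ≤ q.2 := by
      rw [hd3]
      apply score_values_pos _ _ (by norm_num)
      apply score_values_pos _ _ (by norm_num)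
      apply score_values_pos _ _ (by norm_num)
      intro q hq
      rw [show (PySem.Dict.empty : PySem.Dict String Int).items = [] from rfl] at hq
      cases hq
    -- the bucket dict's lookups are the score-filtered keyword lists
    have hbget : ∀ s : Int,
        (d3.items.foldl (fun b p => b.modify p.2 [] (fun ks => ks ++ [p.1]))
          (PySem.Dict.empty : PySem.Dict Int (List String))).getD s []
        = (d3.items.filter (fun q => q.2 == s)).map (fun q => q.1) := by
      intro s
      have hfold : d3.items.foldl (fun b p => b.modify p.2 [] (fun ks => ks ++ [p.1])) (PySem.Dict.empty : PySem.Dict Int (List String))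
          = (d3.items.map (fun p : String × Int => (p.2, p.1))).foldl (fun b q => b.modify q.1 [] (fun ks => ks ++ [q.2])) PySem.Dict.empty :=
        (List.foldl_map (f := fun p : String × Int => (p.2, p.1))
          (g := fun (b : PySem.Dict Int (List String)) (q : Int × String) => b.modify q.1 [] (fun ks => ks ++ [q.2]))).symm
      rw [hfold, PySem.Dict.getD_foldl_modify_append]
      simp [List.filter_map, Function.comp_def]
    -- the bucket dict's keys are exactly the scores
    have hkeys : ∀ s : Int,
        (s ∈ (d3.items.foldl (fun b p => b.modify p.2 [] (fun ks => ks ++ [p.1]))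
          (PySem.Dict.empty : PySem.Dict Int (List String))).keys) ↔ s ∈ d3.items.map (fun q => q.2) := by
      intro s
      have hk : (d3.items.foldl (fun b p => b.modify p.2 [] (fun ks => ks ++ [p.1])) (PySem.Dict.empty : PySem.Dict Int (List String))).keys
          = PySem.Set.update (PySem.Dict.empty : PySem.Dict Int (List String)).keys (d3.items.map (fun q => q.2)) :=
        PySem.Dict.keys_foldl_modify_key d3.items (fun q : String × Int => q.2) ([] : List String)
          (fun (b : PySem.Dict Int (List String)) (p : String × Int) => fun ks => ks ++ [p.1]) PySem.Dict.empty
      rw [hk, PySem.Set.mem_update]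
      rw [show (PySem.Dict.empty : PySem.Dict Int (List String)).keys = ([] : PySem.Set Int) from rfl]
      simp
    obtain ⟨top, hmax⟩ : ∃ t, PySem.List.max? ((d3.items.foldl (fun b p => b.modify p.2 [] (fun ks => ks ++ [p.1]))
        (PySem.Dict.empty : PySem.Dict Int (List String))).keys) (fun s => s) = some t := by
      cases h : PySem.List.max? ((d3.items.foldl (fun b p => b.modify p.2 [] (fun ks => ks ++ [p.1]))
          (PySem.Dict.empty : PySem.Dict Int (List String))).keys) (fun s => s) with
      | none =>
        exfalso
        rw [PySem.List.max?_eq_none_iff] at h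
        obtain ⟨q, hq⟩ := List.exists_mem_of_ne_nil _ hnil
        have hm := (hkeys q.2).mpr (List.mem_map_of_mem hq)
        rw [h] at hm
        cases hm
      | some t => exact ⟨t, rfl⟩
    simp only [hmax]
    · have htopmem : top ∈ d3.items.map (fun q => q.2) := (hkeys top).mp (PySem.List.max?_mem hmax)
      have htop1 : 1 ≤ top := by
        obtain ⟨q, hq, hq2⟩ := List.mem_map.mp htopmem
        have := hpos q hq
        omega
      have hle : ∀ q ∈ d3.items, q.2 ≤ top := by
        intro q hq
        exact PySem.List.max?_isMax hmax q.2 ((hkeys q.2).mpr (List.mem_map_of_mem hq))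
      have htopNat : ((top.toNat : Nat) : Int) = top := Int.toNat_of_nonneg (by omega)
      rw [← htopNat, pyRange_down]
      have hB : (pvDsc top.toNat).flatMap (fun s =>
          (d3.items.foldl (fun b p => b.modify p.2 [] (fun ks => ks ++ [p.1]))
            (PySem.Dict.empty : PySem.Dict Int (List String))).getD s [])
          = ((pvDsc top.toNat).flatMap (fun s => d3.items.filter (fun q => q.2 == s))).map (fun q => q.1) := by
        rw [List.map_flatMap]
        exact List.flatMap_congr (fun s _ => hbget s)
      rw [hB, sorted_rev_eq_flatMap (fun q => q.2) d3.items top.toNat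
        (fun q hq => ⟨(hpos q hq), by rw [htopNat]; exact hle q hq⟩)]
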